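-- pv_equiv track=rewrite | github.com/aneall/comp110-22f-workspace | exercises/quiz02_practice.py | odd_and_even
-- ===== SOURCE A (Python) =====
-- def odd_and_even(a: list[int]) -> list[int]:
--     new_list: list[int] = []
--     index: int = 0
--     for i in a:
--         if index % 2 == 0 and i % 2 != 0:
--                 new_list.append(a[index])
--         index += 1
--     return new_list
-- ===== SOURCE B (Python) =====
-- def odd_and_even(a: list[int]) -> list[int]:
--     out: list[int] = []
--     it = iter(a)
--     for x in it:
--         if x % 2 != 0:
--             out.append(x)
--         next(it, None)  # skip the following odd-position element
--     return out
-- ===== Notes on version B (the rewrite author's own statement) =====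
-- stated objective: alternative
-- what changed: Replaces the indexed loop over every element with an index-parity guard by an iterator loop that consumes two elements per step (emit the first if odd, skip the second), so no index counter or parity test exists.
import Mathlib
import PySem

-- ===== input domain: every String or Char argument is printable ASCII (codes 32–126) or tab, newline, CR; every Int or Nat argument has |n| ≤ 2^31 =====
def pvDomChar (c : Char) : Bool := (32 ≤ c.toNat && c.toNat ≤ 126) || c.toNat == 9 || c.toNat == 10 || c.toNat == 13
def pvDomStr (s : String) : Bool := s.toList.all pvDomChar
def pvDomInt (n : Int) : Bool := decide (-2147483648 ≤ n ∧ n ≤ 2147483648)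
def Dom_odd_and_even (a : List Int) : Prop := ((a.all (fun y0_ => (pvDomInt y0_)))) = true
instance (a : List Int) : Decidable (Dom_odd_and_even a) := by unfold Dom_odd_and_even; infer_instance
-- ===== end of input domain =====

-- B replaces A's indexed full-list loop with its parity guard by a loop that consumes two elements per step (no index counter); same values.

-- ===== PORT A =====
-- literal transliteration: fold over the elements carrying (new_list, index); appends a[index]
def odd_and_even (a : List Int) : List Int :=
  (a.foldl (fun (st : List Int × Int) (i : Int) =>
      ((if st.2 % 2 == 0 && i % 2 != 0 then
          match PySem.List.pyGet? a st.2 with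
          | some v => st.1 ++ [v]
          | none => st.1
        else st.1), st.2 + 1)) ([], 0)).1

-- ===== PORT B =====
-- transliteration of Source B's iterator loop: each iteration takes x, emits it if odd, and skips the next element
def odd_and_even_alt : List Int → List Int
  | [] => []
  | [x] => if x % 2 != 0 then [x] else []
  | x :: _ :: xs => if x % 2 != 0 then x :: odd_and_even_alt xs else odd_and_even_alt xs

-- ===== PRECONDITION & SPEC =====
def Spec_odd_and_even (a : List Int) (out : List Int) : Prop := out = odd_and_even_alt a
instance (a : List Int) (out : List Int) : Decidable (Spec_odd_and_even a out) := by unfold Spec_odd_and_even; infer_instance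

-- ===== CLAIM (what is proved, stated in full; the proofs are below) =====
def Claim_equal_odd_and_even : Prop := ∀ (a : List Int), Dom_odd_and_even a → Spec_odd_and_even a (odd_and_even a)

-- ===== LEMMAS AND PROOFS =====

-- proof-side characterisation of A: collect elements at positions of given parity
def pvG : Int → List Int → List Int
  | _, [] => []
  | k, x :: xs => (if k % 2 == 0 && x % 2 != 0 then [x] else []) ++ pvG (k + 1) xs

lemma pvG_even (l : List Int) : ∀ (k : Int), k % 2 = 0 → pvG k l = odd_and_even_alt l := by
  induction l using odd_and_even_alt.induct with
  | case1 => intro k _; simp [pvG, odd_and_even_alt]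
  | case2 x hx => intro k hk; simp [pvG, odd_and_even_alt, hk, hx]
  | case3 x hx => intro k hk; simp [pvG, odd_and_even_alt, hk, hx]
  | case4 x y xs hx ih =>
    intro k hk
    have h1 : (k + 1) % 2 = 1 := by omega
    have hrec := ih (k + 1 + 1) (by omega)
    simp [pvG, odd_and_even_alt, hk, h1, hx, hrec]
  | case5 x y xs hx ih =>
    intro k hk
    have h1 : (k + 1) % 2 = 1 := by omega
    have hrec := ih (k + 1 + 1) (by omega)
    simp [pvG, odd_and_even_alt, hk, h1, hx, hrec]

lemma foldA (a : List Int) : ∀ (l : List Int) (n : Nat) (acc : List Int), a.drop n = l →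
    (List.foldl (fun (st : List Int × Int) (i : Int) =>
      ((if st.2 % 2 == 0 && i % 2 != 0 then
          match PySem.List.pyGet? a st.2 with
          | some v => st.1 ++ [v]
          | none => st.1
        else st.1), st.2 + 1)) (acc, (n : Int)) l).1 = acc ++ pvG (n : Int) l := by
  intro l
  induction l with
  | nil => intro n acc _; simp [pvG]
  | cons x xs ih =>
    intro n acc hdrop
    have hx : a[n]? = some x := by
      rw [← List.head?_drop, hdrop]; rfl
    have hxs : a.drop (n + 1) = xs := by
      have h := congrArg List.tail hdrop
      rwa [List.tail_drop] at h
    have hget : PySem.List.pyGet? a (n : Int) = some x := by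
      rw [PySem.List.pyGet?_natCast, hx]
    have hcast : ((n : Int) + 1) = ((n + 1 : Nat) : Int) := by push_cast; ring
    simp only [List.foldl_cons, hget, pvG]
    by_cases hc : ((n : Int) % 2 == 0 && x % 2 != 0) = true
    · simp only [if_pos hc, hcast]
      rw [ih (n + 1) (acc ++ [x]) hxs]
      simp
    · simp only [if_neg hc, hcast]
      rw [ih (n + 1) acc hxs]
      simp

-- ===== VERDICT (by name: the statement is the Claim_ definition above) =====
theorem odd_and_even_spec : Claim_equal_odd_and_even := by
  intro a _
  show odd_and_even a = odd_and_even_alt a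
  unfold odd_and_even
  have h := foldA a a 0 [] (by simp)
  simpa [pvG_even a 0 (by decide)] using h
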